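-- pv_equiv track=rewrite | github.com/Schlesenger/Pokemon-20-questions | main.py | get_most_common_value
-- ===== SOURCE A (Python) =====
-- from collections import Counter
--
-- def get_most_common_value(dict):
--     #creates counter
--     all_values = []
--     for inner_dict in dict.values():
--         all_values.extend(inner_dict.values())
--     value_counts = Counter(all_values)
--
--     #finds most common that doesn't include all pokemon
--     for value, count in value_counts.most_common():
--         if count < len(dict):
--             return value
--     return None
-- ===== SOURCE B (Python) =====
-- def get_most_common_value(dict):
--     # single pass over the counter instead of sorting via most_common():
--     # strict '>' plus Counter's first-seen iteration order reproduces the stable tie-break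
--     all_values = []
--     for inner_dict in dict.values():
--         all_values.extend(inner_dict.values())
--     value_counts = {}
--     for v in all_values:
--         value_counts[v] = value_counts.get(v, 0) + 1
--     n = len(dict)
--     best_value = None
--     best_count = None
--     for value, count in value_counts.items():
--         if count < n and (best_count is None or count > best_count):
--             best_value = value
--             best_count = count
--     return best_value
-- ===== Notes on version B (the rewrite author's own statement) =====
-- stated objective: alternative
-- what changed: B replaces most_common()'s sort of the counter items followed by a first-hit scan with a single linear argmax pass over the counter's items (strict '>' plus first-seen iteration order reproduces the stable tie-break).
import Mathlib
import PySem

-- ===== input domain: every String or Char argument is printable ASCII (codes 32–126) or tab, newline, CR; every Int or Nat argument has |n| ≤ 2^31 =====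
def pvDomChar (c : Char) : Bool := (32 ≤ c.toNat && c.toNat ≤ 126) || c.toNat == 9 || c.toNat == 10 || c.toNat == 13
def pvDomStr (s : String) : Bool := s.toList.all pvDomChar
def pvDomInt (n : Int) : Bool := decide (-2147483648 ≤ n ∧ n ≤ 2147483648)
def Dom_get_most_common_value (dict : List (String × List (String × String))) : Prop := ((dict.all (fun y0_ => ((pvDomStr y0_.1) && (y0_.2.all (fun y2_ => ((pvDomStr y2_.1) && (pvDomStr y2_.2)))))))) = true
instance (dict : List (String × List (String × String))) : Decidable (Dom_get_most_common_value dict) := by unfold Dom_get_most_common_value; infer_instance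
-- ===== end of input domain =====

-- B replaces most_common()'s sort + first-hit scan by a single linear argmax pass over the counter's
-- items (strict '>' + first-seen iteration order reproduces the stable tie-break); objective: alternative.

-- ===== PORT A =====
-- A: collect all inner values, Counter them, walk most_common() (= items sorted by count,
-- reverse=True, stable) and return the first value whose count < len(dict); else None.
def get_most_common_value (dict : List (String × List (String × String))) : Option String :=
  let all_values : List String :=
    dict.foldl (fun acc inner_dict => acc ++ inner_dict.2.map (fun p => p.2)) []
  let value_counts := PySem.Dict.counter all_values
  ((PySem.List.sorted value_counts.items (fun p => p.2) true).find?
      (fun p => decide (p.2 < (dict.length : Int)))).map (fun p => p.1)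

-- ===== PORT B =====
-- B's loop body: keep the best (value, count) with count < n, updating only on strict '>'.
def pvStep (n : Int) (st : Option String × Option Int) (p : String × Int) : Option String × Option Int :=
  if p.2 < n && (match st.2 with | none => true | some b => decide (b < p.2)) then
    (some p.1, some p.2)
  else st

-- B: same value collection, counter built with value_counts[v] = value_counts.get(v, 0) + 1,
-- then one pass over the counter's items with pvStep.
def get_most_common_value_alt (dict : List (String × List (String × String))) : Option String :=
  let all_values : List String :=
    dict.foldl (fun acc inner_dict => acc ++ inner_dict.2.map (fun p => p.2)) []
  let value_counts : PySem.Dict String Int :=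
    all_values.foldl (fun d v => d.insert v (d.getD v 0 + 1)) PySem.Dict.empty
  (value_counts.items.foldl (pvStep (dict.length : Int))
    ((none, none) : Option String × Option Int)).1

-- ===== PRECONDITION & SPEC =====
def Spec_get_most_common_value (dict : List (String × List (String × String))) (out : Option String) : Prop := out = get_most_common_value_alt dict
instance (dict : List (String × List (String × String))) (out : Option String) : Decidable (Spec_get_most_common_value dict out) := by unfold Spec_get_most_common_value; infer_instance

-- ===== CLAIM (what is proved, stated in full; the proofs are below) =====
def Claim_equal_get_most_common_value : Prop := ∀ (dict : List (String × List (String × String))), Dom_get_most_common_value dict → Spec_get_most_common_value dict (get_most_common_value dict)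

-- ===== LEMMAS AND PROOFS =====

-- The state B's scan reaches, read off from a descending-sorted list: its first item with count < n.
def pvStateOf (n : Int) (s : List (String × Int)) : Option String × Option Int :=
  match s.find? (fun p => decide (p.2 < n)) with
  | none => (none, none)
  | some p => (some p.1, some p.2)

-- Inserting a non-matching element anywhere does not change find?.
theorem find?_insertBy_of_neg {α : Type} (before : α → α → Bool) (q : α → Bool) (x : α)
    (s : List α) (hx : q x = false) :
    (PySem.List.insertBy before x s).find? q = s.find? q := by
  induction s with
  | nil => simp [PySem.List.insertBy, List.find?, hx]
  | cons y ys ih =>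
    simp only [PySem.List.insertBy]
    by_cases hb : before x y = true
    · simp [hb, List.find?, hx]
    · simp only [hb, Bool.false_eq_true, if_false]
      cases hq : q y <;> simp [List.find?, hq, ih]

-- Key step: on a descending-sorted state list, a stable reverse-order insertion of x followed by
-- taking the first item with count < n is exactly B's update rule applied to the previous state.
theorem pvStateOf_insertBy (n : Int) (x : String × Int) (s : List (String × Int))
    (hs : s.Pairwise (fun a b => b.2 ≤ a.2)) :
    pvStateOf n (PySem.List.insertBy (fun a b => decide (b.2 < a.2)) x s) = pvStep n (pvStateOf n s) x := by
  by_cases hx : x.2 < n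
  · induction s with
    | nil => simp [PySem.List.insertBy, pvStateOf, pvStep, List.find?, hx]
    | cons y ys ih =>
      by_cases hb : y.2 < x.2
      · -- x goes in front of y, and is the new first qualifying item iff it beats the old one
        have hins : PySem.List.insertBy (fun a b => decide (b.2 < a.2)) x (y :: ys) = x :: y :: ys := by
          simp [PySem.List.insertBy, hb]
        rw [hins]
        have hLHS : pvStateOf n (x :: y :: ys) = (some x.1, some x.2) := by
          simp [pvStateOf, List.find?, hx]
        rw [hLHS]
        cases hf : List.find? (fun p => decide (p.2 < n)) (y :: ys) with
        | none => simp [pvStep, pvStateOf, hf, hx]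
        | some m =>
          have hmem : m ∈ y :: ys := List.mem_of_find?_eq_some hf
          have hmy : m.2 ≤ y.2 := by
            rcases List.mem_cons.mp hmem with h | h
            · simp [h]
            · exact (List.pairwise_cons.mp hs).1 m h
          have hlt : m.2 < x.2 := lt_of_le_of_lt hmy hb
          simp [pvStep, pvStateOf, hf, hx, hlt]
      · -- y stays in front; x sinks into ys
        have hins : PySem.List.insertBy (fun a b => decide (b.2 < a.2)) x (y :: ys)
            = y :: PySem.List.insertBy (fun a b => decide (b.2 < a.2)) x ys := by
          simp [PySem.List.insertBy, hb]
        rw [hins]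
        have hs' : ys.Pairwise (fun a b => b.2 ≤ a.2) := (List.pairwise_cons.mp hs).2
        by_cases hy : y.2 < n
        · -- old best y survives: x does not strictly beat it
          simp [pvStateOf, List.find?, hy, pvStep, hx, hb]
        · -- y never qualifies on either side: recurse
          have hLHS : pvStateOf n (y :: PySem.List.insertBy (fun a b => decide (b.2 < a.2)) x ys)
              = pvStateOf n (PySem.List.insertBy (fun a b => decide (b.2 < a.2)) x ys) := by
            simp [pvStateOf, List.find?, hy]
          have hRHS : pvStateOf n (y :: ys) = pvStateOf n ys := by
            simp [pvStateOf, List.find?, hy]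
          rw [hLHS, hRHS, ih hs']
  · -- x never qualifies: the observed state is unchanged
    have hq : (fun p : String × Int => decide (p.2 < n)) x = false := by simpa using hx
    unfold pvStateOf
    rw [find?_insertBy_of_neg (fun a b => decide (b.2 < a.2)) (fun p => decide (p.2 < n)) x s hq]
    cases hf : List.find? (fun p : String × Int => decide (p.2 < n)) s with
    | none => simp [pvStep, hx]
    | some m => simp [pvStep, hx]

-- B's scan over any list l equals reading the state off the reverse-stable-sorted l.
theorem pvScan_eq_stateOf (n : Int) (l : List (String × Int)) :
    l.foldl (pvStep n) (none, none) = pvStateOf n (PySem.List.sorted l (fun p => p.2) true) := by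
  induction l using List.reverseRecOn with
  | nil => simp [PySem.List.sorted_rev_eq_foldl_insertBy, pvStateOf]
  | append_singleton l x ih =>
    have h1 : PySem.List.sorted (l ++ [x]) (fun p : String × Int => p.2) true
        = PySem.List.insertBy (fun a b => decide (b.2 < a.2)) x
            (PySem.List.sorted l (fun p : String × Int => p.2) true) := by
      rw [PySem.List.sorted_rev_eq_foldl_insertBy, PySem.List.sorted_rev_eq_foldl_insertBy,
        List.foldl_append, List.foldl_cons, List.foldl_nil]
    rw [List.foldl_append, List.foldl_cons, List.foldl_nil, ih, h1,
      pvStateOf_insertBy n x _ (PySem.List.sorted_pairwise_rev l (fun p => p.2))]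

-- ===== VERDICT (by name: the statement is the Claim_ definition above) =====
theorem get_most_common_value_spec : Claim_equal_get_most_common_value := by
  intro dict _
  unfold Spec_get_most_common_value
  simp only [get_most_common_value, get_most_common_value_alt]
  rw [PySem.Dict.foldl_insert_getD_add_one_eq_counter, pvScan_eq_stateOf]
  cases hf : ((PySem.List.sorted (PySem.Dict.counter
      (dict.foldl (fun acc inner_dict => acc ++ inner_dict.2.map (fun p => p.2)) [])).items
      (fun p => p.2) true).find? (fun p => decide (p.2 < (dict.length : Int)))) with
  | none => unfold pvStateOf; rw [hf]; rfl
  | some m => unfold pvStateOf; rw [hf]; rfl
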